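-- pv_equiv track=rewrite | github.com/tpircher-zz/quine-mccluskey | quine_mccluskey_tomas789/qm.py | reduce_simple_xnor_terms
-- ===== SOURCE A (Python) =====
-- from typing import Dict, Iterable, List, Optional, Set, Tuple
--
-- def reduce_simple_xnor_terms(t1: str, t2: str) -> Optional[str]:
--     """Try to reduce two terms t1 and t2, by combining them as XNOR terms.
--
--     Args:
--         t1 (str): a term.
--         t2 (str): a term.
--
--     Returns:
--         The reduced term or None if the terms cannot be reduced.
--     """
--     difft10 = 0
--     difft20 = 0
--     ret = []
--     for (t1c, t2c) in zip(t1, t2):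
--         if t1c == "^" or t2c == "^" or t1c == "~" or t2c == "~":
--             return None
--         if t1c != t2c:
--             ret.append("~")
--             if t1c == "0":
--                 difft10 += 1
--             else:
--                 difft20 += 1
--         else:
--             ret.append(t1c)
--     if (difft10 == 2 and difft20 == 0) or (difft10 == 0 and difft20 == 2):
--         return "".join(ret)
--     return None
-- ===== SOURCE B (Python) =====
-- def reduce_simple_xnor_terms(t1, t2):
--     """Multi-pass re-implementation: materialise the zipped pairs once, then
--     check for '^'/'~', collect the differing t1-characters, test the XNOR
--     condition on that list, and finally paint the result string."""
--     pairs = list(zip(t1, t2))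
--     if any(x in "^~" or y in "^~" for x, y in pairs):
--         return None
--     diffs = [x for x, y in pairs if x != y]
--     if len(diffs) != 2:
--         return None
--     if all(x == "0" for x in diffs) or all(x != "0" for x in diffs):
--         return "".join("~" if x != y else x for x, y in pairs)
--     return None
-- ===== Notes on version B (the rewrite author's own statement) =====
-- stated objective: alternative
-- what changed: A's single fused loop with two difference counters and an early return is replaced by a multi-pass pipeline: zip once, an any-pass for '^'/'~', a filter collecting the differing t1-characters, an all-test of the XNOR condition on that list, and a final map building the output.
import Mathlib
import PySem

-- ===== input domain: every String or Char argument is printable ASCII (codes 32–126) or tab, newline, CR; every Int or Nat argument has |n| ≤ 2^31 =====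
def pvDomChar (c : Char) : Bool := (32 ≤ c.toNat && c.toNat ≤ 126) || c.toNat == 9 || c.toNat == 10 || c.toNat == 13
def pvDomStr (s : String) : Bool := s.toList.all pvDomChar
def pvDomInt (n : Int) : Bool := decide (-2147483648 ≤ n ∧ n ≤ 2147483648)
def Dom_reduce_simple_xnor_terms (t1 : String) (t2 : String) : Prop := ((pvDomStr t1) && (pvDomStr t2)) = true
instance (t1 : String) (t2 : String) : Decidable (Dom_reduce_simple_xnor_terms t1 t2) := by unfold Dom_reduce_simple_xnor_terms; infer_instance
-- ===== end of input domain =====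

-- B replaces A's single fused counter loop by a multi-pass zip/filter/all pipeline (objective: alternative, same O(n) cost).

-- ===== PORT A =====
-- literal transliteration of A's fused loop: two Int counters, an accumulator list, early return on '^'/'~'
def reduceXnorLoopA : List Char → List Char → Int → Int → List Char → Option String
  | t1c :: t1s, t2c :: t2s, difft10, difft20, ret =>
    if t1c = '^' ∨ t2c = '^' ∨ t1c = '~' ∨ t2c = '~' then none
    else if t1c ≠ t2c then
      if t1c = '0' then reduceXnorLoopA t1s t2s (difft10 + 1) difft20 (ret ++ ['~'])
      else reduceXnorLoopA t1s t2s difft10 (difft20 + 1) (ret ++ ['~'])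
    else reduceXnorLoopA t1s t2s difft10 difft20 (ret ++ [t1c])
  | _, _, difft10, difft20, ret =>
    if (difft10 = 2 ∧ difft20 = 0) ∨ (difft10 = 0 ∧ difft20 = 2) then some (String.ofList ret)
    else none

def reduce_simple_xnor_terms (t1 : String) (t2 : String) : Option String :=
  reduceXnorLoopA t1.toList t2.toList 0 0 []

-- ===== PORT B =====
-- literal transliteration of Source B: zip once, any-pass, filter the differing t1-chars, all-test, map
def reduce_simple_xnor_terms_alt (t1 : String) (t2 : String) : Option String :=
  let pairs := t1.toList.zip t2.toList
  if pairs.any (fun p => p.1 = '^' || p.1 = '~' || p.2 = '^' || p.2 = '~') then none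
  else
    let diffs := (pairs.filter (fun p => p.1 ≠ p.2)).map Prod.fst
    if diffs.length ≠ 2 then none
    else if diffs.all (fun x => x = '0') || diffs.all (fun x => x ≠ '0') then
      some (String.ofList (pairs.map (fun p => if p.1 ≠ p.2 then '~' else p.1)))
    else none

-- ===== PRECONDITION & SPEC =====
def Spec_reduce_simple_xnor_terms (t1 : String) (t2 : String) (out : Option String) : Prop := out = reduce_simple_xnor_terms_alt t1 t2
instance (t1 : String) (t2 : String) (out : Option String) : Decidable (Spec_reduce_simple_xnor_terms t1 t2 out) := by unfold Spec_reduce_simple_xnor_terms; infer_instance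

-- ===== CLAIM (what is proved, stated in full; the proofs are below) =====
def Claim_equal_reduce_simple_xnor_terms : Prop := ∀ (t1 : String) (t2 : String), Dom_reduce_simple_xnor_terms t1 t2 → Spec_reduce_simple_xnor_terms t1 t2 (reduce_simple_xnor_terms t1 t2)

-- ===== LEMMAS AND PROOFS =====

def pvBad (p : Char × Char) : Bool := p.1 = '^' || p.1 = '~' || p.2 = '^' || p.2 = '~'
def pvPaint (p : Char × Char) : Char := if p.1 ≠ p.2 then '~' else p.1
def pvC0 (z : List (Char × Char)) : Nat := (z.filter (fun p => p.1 ≠ p.2 ∧ p.1 = '0')).length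
def pvC1 (z : List (Char × Char)) : Nat := (z.filter (fun p => p.1 ≠ p.2 ∧ p.1 ≠ '0')).length

-- characterisation of A's loop over the zipped list
lemma loopA_char : ∀ (l1 l2 : List Char) (d10 d20 : Int) (ret : List Char),
    reduceXnorLoopA l1 l2 d10 d20 ret =
      if (l1.zip l2).any pvBad then none
      else if (d10 + pvC0 (l1.zip l2) = 2 ∧ d20 + pvC1 (l1.zip l2) = 0) ∨
              (d10 + pvC0 (l1.zip l2) = 0 ∧ d20 + pvC1 (l1.zip l2) = 2) then
        some (String.ofList (ret ++ (l1.zip l2).map pvPaint))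
      else none := by
  intro l1
  induction l1 with
  | nil => intro l2 d10 d20 ret; simp [reduceXnorLoopA, pvC0, pvC1]
  | cons a t1s ih =>
    intro l2 d10 d20 ret
    cases l2 with
    | nil => simp [reduceXnorLoopA, pvC0, pvC1]
    | cons b t2s =>
      simp only [reduceXnorLoopA, List.zip_cons_cons, List.any_cons]
      by_cases hbad : a = '^' ∨ b = '^' ∨ a = '~' ∨ b = '~'
      · have hB : pvBad (a, b) = true := by
          rcases hbad with h|h|h|h <;> simp [pvBad, h]
        rw [if_pos hbad, hB, Bool.true_or]
        simp
      · have hB : pvBad (a, b) = false := by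
          rcases not_or.mp hbad with ⟨h1, h234⟩
          rcases not_or.mp h234 with ⟨h2, h34⟩
          rcases not_or.mp h34 with ⟨h3, h4⟩
          simp [pvBad, h1, h2, h3, h4]
        rw [if_neg hbad, hB, Bool.false_or]
        by_cases hne : a ≠ b
        · by_cases h0 : a = '0'
          · rw [if_pos hne, if_pos h0, ih]
            have hc0 : pvC0 ((a, b) :: t1s.zip t2s) = pvC0 (t1s.zip t2s) + 1 := by
              subst h0; simp [pvC0, List.filter_cons, hne]
            have hc1 : pvC1 ((a, b) :: t1s.zip t2s) = pvC1 (t1s.zip t2s) := by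
              subst h0; simp [pvC1, List.filter_cons, hne]
            have hp : pvPaint (a, b) = '~' := by simp [pvPaint, hne]
            rw [hc0, hc1, List.map_cons, hp]
            have e1 : ∀ d : Int, d + 1 + (pvC0 (t1s.zip t2s) : Int) = d + ((pvC0 (t1s.zip t2s)) + 1 : Nat) := by
              intro d; push_cast; ring
            rw [e1, List.append_assoc]
            rfl
          · rw [if_pos hne, if_neg h0, ih]
            have hc0 : pvC0 ((a, b) :: t1s.zip t2s) = pvC0 (t1s.zip t2s) := by
              simp [pvC0, List.filter_cons, hne, h0]
            have hc1 : pvC1 ((a, b) :: t1s.zip t2s) = pvC1 (t1s.zip t2s) + 1 := by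
              simp [pvC1, List.filter_cons, hne, h0]
            have hp : pvPaint (a, b) = '~' := by simp [pvPaint, hne]
            rw [hc0, hc1, List.map_cons, hp]
            have e1 : ∀ d : Int, d + 1 + (pvC1 (t1s.zip t2s) : Int) = d + ((pvC1 (t1s.zip t2s)) + 1 : Nat) := by
              intro d; push_cast; ring
            rw [e1, List.append_assoc]
            rfl
        · rw [if_neg hne, ih]
          rw [not_not] at hne
          have hc0 : pvC0 ((a, b) :: t1s.zip t2s) = pvC0 (t1s.zip t2s) := by
            simp [pvC0, List.filter_cons, hne]
          have hc1 : pvC1 ((a, b) :: t1s.zip t2s) = pvC1 (t1s.zip t2s) := by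
            simp [pvC1, List.filter_cons, hne]
          have hp : pvPaint (a, b) = a := by simp [pvPaint, hne]
          rw [hc0, hc1, List.map_cons, hp, List.append_assoc]
          rfl

-- the diff-list facts B's condition rests on
lemma diffs_length (z : List (Char × Char)) :
    ((z.filter (fun p => p.1 ≠ p.2)).map Prod.fst).length = pvC0 z + pvC1 z := by
  induction z with
  | nil => simp [pvC0, pvC1]
  | cons p t ih =>
    obtain ⟨x, y⟩ := p
    simp only [pvC0, pvC1, List.filter_cons] at ih ⊢
    by_cases h : x = y
    · simp only [h]
      simpa using ih
    · by_cases h0 : x = '0'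
      · subst h0
        simp [h] at ih ⊢
        omega
      · simp [h, h0] at ih ⊢
        omega

lemma diffs_all0 (z : List (Char × Char)) :
    ((z.filter (fun p => p.1 ≠ p.2)).map Prod.fst).all (fun x => x = '0') = (pvC1 z == 0) := by
  induction z with
  | nil => simp [pvC1]
  | cons p t ih =>
    obtain ⟨x, y⟩ := p
    simp only [pvC1, List.filter_cons] at ih ⊢
    by_cases h : x = y
    · simpa [h] using ih
    · by_cases h0 : x = '0'
      · subst h0
        simpa [h] using ih
      · simp [h, h0]

lemma diffs_allne0 (z : List (Char × Char)) :
    ((z.filter (fun p => p.1 ≠ p.2)).map Prod.fst).all (fun x => x ≠ '0') = (pvC0 z == 0) := by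
  induction z with
  | nil => simp [pvC0]
  | cons p t ih =>
    obtain ⟨x, y⟩ := p
    simp only [pvC0, List.filter_cons] at ih ⊢
    by_cases h : x = y
    · simpa [h] using ih
    · by_cases h0 : x = '0'
      · subst h0
        simp [h]
      · simpa [h, h0] using ih

-- the whole tail of both programs agrees once A is characterised over the zipped list
lemma main_aux (z : List (Char × Char)) :
    (if z.any pvBad then none
     else if ((0 : Int) + pvC0 z = 2 ∧ (0 : Int) + pvC1 z = 0) ∨
             ((0 : Int) + pvC0 z = 0 ∧ (0 : Int) + pvC1 z = 2) then
       some (String.ofList (([] : List Char) ++ z.map pvPaint))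
     else none) =
    (let pairs := z
     if pairs.any (fun p => p.1 = '^' || p.1 = '~' || p.2 = '^' || p.2 = '~') then none
     else
       let diffs := (pairs.filter (fun p => p.1 ≠ p.2)).map Prod.fst
       if diffs.length ≠ 2 then none
       else if diffs.all (fun x => x = '0') || diffs.all (fun x => x ≠ '0') then
         some (String.ofList (pairs.map (fun p => if p.1 ≠ p.2 then '~' else p.1)))
       else none) := by
  show _ = (if z.any pvBad then none
     else
       if (((z.filter (fun p => p.1 ≠ p.2)).map Prod.fst).length ≠ 2) then none
       else if ((z.filter (fun p => p.1 ≠ p.2)).map Prod.fst).all (fun x => x = '0') ||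
               ((z.filter (fun p => p.1 ≠ p.2)).map Prod.fst).all (fun x => x ≠ '0') then
         some (String.ofList (z.map pvPaint))
       else none)
  by_cases hb : z.any pvBad
  · simp [hb]
  · rw [if_neg hb, if_neg hb, diffs_length, diffs_all0, diffs_allne0, List.nil_append]
    by_cases hlen : pvC0 z + pvC1 z = 2
    · rw [if_neg (by omega : ¬ pvC0 z + pvC1 z ≠ 2)]
      by_cases hor : pvC1 z = 0 ∨ pvC0 z = 0
      · have hcond : ((0 : Int) + pvC0 z = 2 ∧ (0 : Int) + pvC1 z = 0) ∨
            ((0 : Int) + pvC0 z = 0 ∧ (0 : Int) + pvC1 z = 2) := by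
          rcases hor with h | h <;> [left; right] <;> constructor <;> push_cast <;> omega
        have hB : ((pvC1 z == 0) || (pvC0 z == 0)) = true := by
          rcases hor with h | h <;> simp [h]
        rw [if_pos hcond, if_pos hB]
      · have hcond : ¬ (((0 : Int) + pvC0 z = 2 ∧ (0 : Int) + pvC1 z = 0) ∨
            ((0 : Int) + pvC0 z = 0 ∧ (0 : Int) + pvC1 z = 2)) := by
          rw [not_or] at hor; push_cast; omega
        have hB : ¬ ((pvC1 z == 0) || (pvC0 z == 0)) = true := by
          rw [not_or] at hor; simp [hor.1, hor.2]
        rw [if_neg hcond, if_neg hB]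
    · rw [if_pos (by omega : pvC0 z + pvC1 z ≠ 2),
        if_neg (by push_cast; omega :
          ¬ (((0 : Int) + pvC0 z = 2 ∧ (0 : Int) + pvC1 z = 0) ∨
             ((0 : Int) + pvC0 z = 0 ∧ (0 : Int) + pvC1 z = 2)))]

-- ===== VERDICT (by name: the statement is the Claim_ definition above) =====
theorem reduce_simple_xnor_terms_spec : Claim_equal_reduce_simple_xnor_terms := by
  intro t1 t2 _
  unfold Spec_reduce_simple_xnor_terms reduce_simple_xnor_terms reduce_simple_xnor_terms_alt
  rw [loopA_char]
  exact main_aux (t1.toList.zip t2.toList)
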